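-- pv_equiv track=rewrite | github.com/ClearAnatomics/ClearMap | ClearMap/config/config_adjusters.py | _config_keys_overlap
-- ===== SOURCE A (Python) =====
-- from typing import Protocol, Mapping, Any, Dict, List, Optional, Set, Tuple, Iterable, Callable
--
-- ConfigKeys = tuple[str, ...]
--
-- ConfigKeysLike = str | ConfigKeys
--
-- def to_config_keys(x: ConfigKeysLike) -> ConfigKeys:
--     return x if isinstance(x, tuple) else tuple(x.split("."))
--
-- def to_config_keys_list(xs: Optional[Iterable[ConfigKeysLike]]) -> Optional[List[ConfigKeys]]:
--     return None if xs is None else [to_config_keys(x) for x in xs]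
--
-- def _config_keys_overlap(changed_keys: Optional[Iterable[ConfigKeysLike]],
--                          watched_prefixes: Optional[Tuple[ConfigKeysLike, ...]]) -> bool:
--     """
--     True if `changed` touches any `keys` prefix.
--     Example:
--       changed=["registration.channels.Ch488.align_with"]
--       keys=("registration.channels",)  -> True
--       keys=("stitching.channels",)     -> False
--     If `keys` is None or `changed` is None/empty, return True (do not filter).
--
--     .. note::
--
--         This is made to know which adjusters to run based on config
--         parts that have changed in the current config patch.
--         This way if one adjuster alters part of the config that
--         other adjusters depend on, those will be run too.
--     """
--     changed_t = to_config_keys_list(changed_keys)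
--     watched_prefixes_t = to_config_keys_list(watched_prefixes)
--     if not watched_prefixes_t or not changed_t:
--         return True
--     for changed_k in changed_t:
--         for watched_k in watched_prefixes_t:
--             if len(changed_k) >= len(watched_k) and changed_k[:len(watched_k)] == watched_k:
--                 return True
--     return False
-- ===== SOURCE B (Python) =====
-- from typing import Optional, Iterable, Tuple, List
--
-- ConfigKeys = tuple
--
-- def to_config_keys(x):
--     return x if isinstance(x, tuple) else tuple(x.split("."))
--
-- def to_config_keys_list(xs):
--     return None if xs is None else [to_config_keys(x) for x in xs]
--
-- def _config_keys_overlap(changed_keys: Optional[Iterable],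
--                          watched_prefixes: Optional[Tuple]) -> bool:
--     changed_t = to_config_keys_list(changed_keys)
--     watched_prefixes_t = to_config_keys_list(watched_prefixes)
--     if not watched_prefixes_t or not changed_t:
--         return True
--     prefixes = set()
--     for c in changed_t:
--         for i in range(len(c) + 1):
--             prefixes.add(c[:i])
--     return any(w in prefixes for w in watched_prefixes_t)
-- ===== Notes on version B (the rewrite author's own statement) =====
-- stated objective: alternative
-- what changed: Instead of re-comparing every (changed, watched) pair by slicing, B builds a hash set of all prefixes of the changed keys once and answers by set membership for each watched prefix.
import Mathlib
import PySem

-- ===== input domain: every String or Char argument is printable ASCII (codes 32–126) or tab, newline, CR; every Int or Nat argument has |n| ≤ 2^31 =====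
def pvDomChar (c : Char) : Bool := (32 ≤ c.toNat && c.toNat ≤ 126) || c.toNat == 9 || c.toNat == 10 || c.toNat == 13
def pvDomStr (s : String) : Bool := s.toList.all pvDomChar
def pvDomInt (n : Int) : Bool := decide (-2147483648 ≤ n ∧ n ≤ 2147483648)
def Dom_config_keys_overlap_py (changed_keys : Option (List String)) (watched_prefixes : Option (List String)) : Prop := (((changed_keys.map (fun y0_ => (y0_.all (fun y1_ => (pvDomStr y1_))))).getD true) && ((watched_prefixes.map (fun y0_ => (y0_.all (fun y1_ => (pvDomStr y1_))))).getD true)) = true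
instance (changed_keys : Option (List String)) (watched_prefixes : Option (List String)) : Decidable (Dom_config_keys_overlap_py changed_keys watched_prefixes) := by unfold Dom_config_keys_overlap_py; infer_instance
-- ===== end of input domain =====

-- B replaces A's pairwise slice-and-compare double loop by a set of all prefixes of the
-- changed keys built once, answered by membership for each watched prefix (objective: alternative).

-- ===== PORT A =====
-- to_config_keys for a string argument: tuple(x.split("."))
-- sep is the literal "." ≠ "", so split? is always some; getD [] never fires
def pvToKeys (x : String) : List String := (PySem.Str.split? x ".").getD []

-- to_config_keys_list
def pvToKeysList (xs : Option (List String)) : Option (List (List String)) :=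
  xs.map (fun l => l.map pvToKeys)

-- Python truthiness of an Optional[list]: None or empty list is falsy
def pvFalsy (o : Option (List (List String))) : Bool :=
  match o with
  | none => true
  | some l => l.isEmpty

def config_keys_overlap_py (changed_keys : Option (List String)) (watched_prefixes : Option (List String)) : Bool :=
  let changed_t := pvToKeysList changed_keys
  let watched_prefixes_t := pvToKeysList watched_prefixes
  if pvFalsy watched_prefixes_t || pvFalsy changed_t then true
  else
    -- the two for-loops with early 'return True' = any/any
    (changed_t.getD []).any (fun changed_k =>
      (watched_prefixes_t.getD []).any (fun watched_k =>
        decide (watched_k.length ≤ changed_k.length) &&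
          (changed_k.take watched_k.length == watched_k)))

-- ===== PORT B =====
-- inner loop of Source B: for i in range(len(c)+1): prefixes.add(c[:i])
-- (range(len(c)+1) over the nonnegative indices 0..len(c) is exactly List.range (len+1))
def pvAddPrefixes (s : PySem.Set (List String)) (c : List String) : PySem.Set (List String) :=
  (List.range (c.length + 1)).foldl (fun s i => PySem.Set.add s (c.take i)) s

def config_keys_overlap_py_alt (changed_keys : Option (List String)) (watched_prefixes : Option (List String)) : Bool :=
  let changed_t := pvToKeysList changed_keys
  let watched_prefixes_t := pvToKeysList watched_prefixes
  if pvFalsy watched_prefixes_t || pvFalsy changed_t then true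
  else
    let prefixes := (changed_t.getD []).foldl pvAddPrefixes PySem.Set.empty
    (watched_prefixes_t.getD []).any (fun w => PySem.Set.contains prefixes w)

-- ===== PRECONDITION & SPEC =====
def Spec_config_keys_overlap_py (changed_keys : Option (List String)) (watched_prefixes : Option (List String)) (out : Bool) : Prop := out = config_keys_overlap_py_alt changed_keys watched_prefixes
instance (changed_keys : Option (List String)) (watched_prefixes : Option (List String)) (out : Bool) : Decidable (Spec_config_keys_overlap_py changed_keys watched_prefixes out) := by unfold Spec_config_keys_overlap_py; infer_instance

-- ===== CLAIM (what is proved, stated in full; the proofs are below) =====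
def Claim_equal_config_keys_overlap_py : Prop := ∀ (changed_keys : Option (List String)) (watched_prefixes : Option (List String)), Dom_config_keys_overlap_py changed_keys watched_prefixes → Spec_config_keys_overlap_py changed_keys watched_prefixes (config_keys_overlap_py changed_keys watched_prefixes)

-- ===== LEMMAS AND PROOFS =====

-- membership after folding Set.add over a list of generated elements
theorem mem_foldl_add {α β : Type} [BEq α] [LawfulBEq α] (l : List β) (s : PySem.Set α) (f : β → α) (w : α) :
    (w ∈ l.foldl (fun s i => PySem.Set.add s (f i)) s) ↔ w ∈ s ∨ ∃ i ∈ l, f i = w := by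
  induction l generalizing s with
  | nil => simp
  | cons x xs ih =>
    simp [List.foldl_cons, ih, PySem.Set.mem_add]
    tauto

-- membership in pvAddPrefixes
theorem mem_addPrefixes (s : PySem.Set (List String)) (c : List String) (w : List String) :
    w ∈ pvAddPrefixes s c ↔ w ∈ s ∨ (w.length ≤ c.length ∧ c.take w.length = w) := by
  unfold pvAddPrefixes
  rw [mem_foldl_add]
  constructor
  · rintro (h | ⟨i, hi, rfl⟩)
    · exact Or.inl h
    · refine Or.inr ⟨by simp, ?_⟩
      simp [List.length_take, List.take_take]
  · rintro (h | ⟨hlen, htake⟩)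
    · exact Or.inl h
    · exact Or.inr ⟨w.length, by simp [List.mem_range]; omega, htake⟩

-- membership in the full prefix set
theorem mem_prefixSet (cs : List (List String)) (s : PySem.Set (List String)) (w : List String) :
    w ∈ cs.foldl pvAddPrefixes s ↔ w ∈ s ∨ ∃ c ∈ cs, w.length ≤ c.length ∧ c.take w.length = w := by
  induction cs generalizing s with
  | nil => simp
  | cons c cs ih =>
    simp [List.foldl_cons, ih, mem_addPrefixes]
    tauto

-- ===== VERDICT (by name: the statement is the Claim_ definition above) =====
theorem config_keys_overlap_py_spec : Claim_equal_config_keys_overlap_py := by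
  intro changed_keys watched_prefixes _
  unfold Spec_config_keys_overlap_py config_keys_overlap_py config_keys_overlap_py_alt
  by_cases hg : (pvFalsy (pvToKeysList watched_prefixes) || pvFalsy (pvToKeysList changed_keys)) = true
  · simp [hg]
  · rw [if_neg hg, if_neg hg, Bool.eq_iff_iff]
    simp only [List.any_eq_true, Bool.and_eq_true, decide_eq_true_eq, beq_iff_eq,
      PySem.Set.contains_iff, mem_prefixSet, PySem.Set.empty, List.not_mem_nil, false_or]
    aesop
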